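-- pv_equiv track=rewrite | github.com/RedRobotKK/TradingBots.fun | .github/scripts/parse_ci.py | parse_audit_output
-- ===== SOURCE A (Python) =====
-- def parse_audit_output(out):
--     vulns, current = [], {}
--     for line in out.splitlines():
--         if 'ID:' in line:
--             if current: vulns.append(current)
--             current = {'id': line.split('ID:')[-1].strip()}
--         elif 'Crate:'    in line and current: current['crate']    = line.split('Crate:')[-1].strip()
--         elif 'Version:'  in line and current: current['version']  = line.split('Version:')[-1].strip()
--         elif 'Title:'    in line and current: current['title']    = line.split('Title:')[-1].strip()[:100]
--         elif 'Severity:' in line and current: current['severity'] = line.split('Severity:')[-1].strip()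
--         elif 'URL:'      in line and current: current['url']      = line.split('URL:')[-1].strip()
--     if current: vulns.append(current)
--     return vulns[:20]
-- ===== SOURCE B (Python) =====
-- _MARKERS = (('crate', 'Crate:'), ('version', 'Version:'), ('title', 'Title:'),
--             ('severity', 'Severity:'), ('url', 'URL:'))
--
--
-- def _parse_group(group):
--     """group[0] is the ID line; the rest are field lines (none contains 'ID:')."""
--     rec = {'id': group[0].split('ID:')[-1].strip()}
--     for line in group[1:]:
--         for key, marker in _MARKERS:
--             if marker in line:
--                 value = line.split(marker)[-1].strip()
--                 rec[key] = value[:100] if key == 'title' else value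
--                 break
--     return rec
--
--
-- def parse_audit_output(out):
--     # phase 1: split the lines into groups, one per ID line (preamble dropped)
--     groups = []
--     for line in out.splitlines():
--         if 'ID:' in line:
--             groups.append([line])
--         elif groups:
--             groups[-1].append(line)
--     # phase 2: parse each of the first 20 groups independently
--     return [_parse_group(g) for g in groups[:20]]
-- ===== Notes on version B (the rewrite author's own statement) =====
-- stated objective: alternative
-- what changed: Replaces A's single interleaved accumulate/flush loop with a two-phase decomposition: first split the lines into groups at each ID line (dropping the preamble), then parse each group independently with a data-driven marker table scanned first-match-wins per line.
import Mathlib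
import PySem

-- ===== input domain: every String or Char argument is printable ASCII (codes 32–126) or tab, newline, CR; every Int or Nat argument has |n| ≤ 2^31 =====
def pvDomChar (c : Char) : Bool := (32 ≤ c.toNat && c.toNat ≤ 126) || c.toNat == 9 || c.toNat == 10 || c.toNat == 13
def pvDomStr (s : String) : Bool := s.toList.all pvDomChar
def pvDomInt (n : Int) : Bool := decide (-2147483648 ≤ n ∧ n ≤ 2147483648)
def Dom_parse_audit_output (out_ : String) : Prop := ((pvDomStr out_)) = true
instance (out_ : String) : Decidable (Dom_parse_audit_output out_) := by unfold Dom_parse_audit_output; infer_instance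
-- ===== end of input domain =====

-- B replaces A's interleaved accumulate/flush loop by a two-phase group-then-parse decomposition (alternative, same cost).

-- ===== PORT A =====
-- line.split(marker)[-1].strip()  (used verbatim by both Pythons)
def pvAfter (marker line : String) : String :=
  PySem.Str.strip (PySem.List.pyGetD ((PySem.Str.split? line marker).getD []) (-1) "")

-- 'ID:' in line
def pvHasID (line : String) : Bool := PySem.Str.isIn "ID:" line

-- Python truthiness of a dict
def pvTruthy (d : PySem.Dict String String) : Bool := !(d.items.isEmpty)

-- one iteration of A's loop body over state (vulns, current)
def pvStepA (st : List (PySem.Dict String String) × PySem.Dict String String) (line : String) :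
    List (PySem.Dict String String) × PySem.Dict String String :=
  if pvHasID line then
    ((if pvTruthy st.2 then st.1 ++ [st.2] else st.1),
     PySem.Dict.empty.insert "id" (pvAfter "ID:" line))
  else if PySem.Str.isIn "Crate:" line && pvTruthy st.2 then
    (st.1, st.2.insert "crate" (pvAfter "Crate:" line))
  else if PySem.Str.isIn "Version:" line && pvTruthy st.2 then
    (st.1, st.2.insert "version" (pvAfter "Version:" line))
  else if PySem.Str.isIn "Title:" line && pvTruthy st.2 then
    (st.1, st.2.insert "title" (PySem.Str.slice (pvAfter "Title:" line) none (some 100)))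
  else if PySem.Str.isIn "Severity:" line && pvTruthy st.2 then
    (st.1, st.2.insert "severity" (pvAfter "Severity:" line))
  else if PySem.Str.isIn "URL:" line && pvTruthy st.2 then
    (st.1, st.2.insert "url" (pvAfter "URL:" line))
  else st

-- A's trailing 'if current: vulns.append(current)'
def pvFinish (st : List (PySem.Dict String String) × PySem.Dict String String) :
    List (PySem.Dict String String) :=
  if pvTruthy st.2 then st.1 ++ [st.2] else st.1

def parse_audit_output (out_ : String) : List (List (String × String)) :=
  (PySem.List.slice (pvFinish ((PySem.Str.splitlines out_).foldl pvStepA ([], PySem.Dict.empty)))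
    none (some 20)).map PySem.Dict.items

-- ===== PORT B =====
-- the _MARKERS table of Source B
def pvMarkers : List (String × String) :=
  [("crate", "Crate:"), ("version", "Version:"), ("title", "Title:"),
   ("severity", "Severity:"), ("url", "URL:")]

-- Source B's inner 'for key, marker in _MARKERS: … break' loop
def pvApplyMarkers (ms : List (String × String)) (rec : PySem.Dict String String)
    (line : String) : PySem.Dict String String :=
  match ms with
  | [] => rec
  | (key, m) :: rest =>
    if PySem.Str.isIn m line then
      let value := pvAfter m line
      rec.insert key (if key == "title" then PySem.Str.slice value none (some 100) else value)
    else pvApplyMarkers rest rec line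

-- Source B's _parse_group
def pvParseGroup (g : List String) : PySem.Dict String String :=
  (PySem.List.slice g (some 1) none).foldl (fun r line => pvApplyMarkers pvMarkers r line)
    (PySem.Dict.empty.insert "id" (pvAfter "ID:" (PySem.List.pyGetD g 0 "")))

-- one iteration of Source B's grouping loop (groups[-1].append(line) = replace the last group)
def pvStepG (gs : List (List String)) (line : String) : List (List String) :=
  if pvHasID line then gs ++ [[line]]
  else if !gs.isEmpty then gs.dropLast ++ [PySem.List.pyGetD gs (-1) [] ++ [line]]
  else gs

def parse_audit_output_alt (out_ : String) : List (List (String × String)) :=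
  (((PySem.List.slice ((PySem.Str.splitlines out_).foldl pvStepG []) none (some 20)).map
    pvParseGroup).map PySem.Dict.items)

-- ===== PRECONDITION & SPEC =====
def Spec_parse_audit_output (out_ : String) (out : List (List (String × String))) : Prop := out = parse_audit_output_alt out_
instance (out_ : String) (out : List (List (String × String))) : Decidable (Spec_parse_audit_output out_ out) := by unfold Spec_parse_audit_output; infer_instance

-- ===== CLAIM (what is proved, stated in full; the proofs are below) =====
def Claim_equal_parse_audit_output : Prop := ∀ (out_ : String), Dom_parse_audit_output out_ → Spec_parse_audit_output out_ (parse_audit_output out_)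

-- ===== LEMMAS AND PROOFS =====

-- shared specification skeleton: parse the rest of the document given a started record d
def pvInitD (l : String) : PySem.Dict String String :=
  PySem.Dict.empty.insert "id" (pvAfter "ID:" l)

def pvFieldStep (d : PySem.Dict String String) (l : String) : PySem.Dict String String :=
  pvApplyMarkers pvMarkers d l

def pvParseCont (d : PySem.Dict String String) : List String → List (PySem.Dict String String)
  | [] => [d]
  | l :: ls => if pvHasID l then d :: pvParseCont (pvInitD l) ls else pvParseCont (pvFieldStep d l) ls

def pvRecords : List String → List (PySem.Dict String String)
  | [] => []
  | l :: ls => if pvHasID l then pvParseCont (pvInitD l) ls else pvRecords ls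

-- recursive form of Source B's grouping
def pvGRec (cur : List String) : List String → List (List String)
  | [] => [cur]
  | l :: ls => if pvHasID l then cur :: pvGRec [l] ls else pvGRec (cur ++ [l]) ls

def pvGroups : List String → List (List String)
  | [] => []
  | l :: ls => if pvHasID l then pvGRec [l] ls else pvGroups ls

-- truthiness facts
theorem pvTruthy_empty : pvTruthy (PySem.Dict.empty : PySem.Dict String String) = false := by
  decide

theorem pvTruthy_insert (d : PySem.Dict String String) (k v : String)
    (h : pvTruthy d = true) : pvTruthy (d.insert k v) = true := by
  simp only [pvTruthy, Bool.not_eq_true', List.isEmpty_eq_false_iff] at *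
  rw [PySem.Dict.items_insert]
  split <;> simp_all

theorem pvTruthy_initD (l : String) : pvTruthy (pvInitD l) = true := by
  simp [pvTruthy, pvInitD, PySem.Dict.items_insert_of_not_contains, PySem.Dict.contains_empty]

theorem pvTruthy_applyMarkers (ms : List (String × String)) (d : PySem.Dict String String)
    (l : String) (h : pvTruthy d = true) : pvTruthy (pvApplyMarkers ms d l) = true := by
  induction ms generalizing d with
  | nil => simpa [pvApplyMarkers] using h
  | cons p rest ih =>
    obtain ⟨key, m⟩ := p
    simp only [pvApplyMarkers]
    split
    · exact pvTruthy_insert _ _ _ h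
    · exact ih d h

theorem pvTruthy_fieldStep (d : PySem.Dict String String) (l : String)
    (h : pvTruthy d = true) : pvTruthy (pvFieldStep d l) = true :=
  pvTruthy_applyMarkers _ _ _ h

-- A's step, case by case
theorem pvStepA_id (v : List (PySem.Dict String String)) (c : PySem.Dict String String)
    (l : String) (h : pvHasID l = true) :
    pvStepA (v, c) l = ((if pvTruthy c then v ++ [c] else v), pvInitD l) := by
  simp [pvStepA, pvHasID] at h ⊢
  simp [h, pvInitD]

theorem pvStepA_field (v : List (PySem.Dict String String)) (c : PySem.Dict String String)
    (l : String) (h : pvHasID l = false) (hc : pvTruthy c = true) :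
    pvStepA (v, c) l = (v, pvFieldStep c l) := by
  unfold pvHasID at h
  simp at h
  simp [pvStepA, pvFieldStep, pvApplyMarkers, pvMarkers, pvHasID, h, hc]
  split_ifs <;> rfl

theorem pvStepA_skip (v : List (PySem.Dict String String)) (c : PySem.Dict String String)
    (l : String) (h : pvHasID l = false) (hc : pvTruthy c = false) :
    pvStepA (v, c) l = (v, c) := by
  unfold pvHasID at h
  simp at h
  simp [pvStepA, pvHasID, h, hc]

-- A's loop after the first ID line
theorem pvFoldA_cont (ls : List String) :
    ∀ (v : List (PySem.Dict String String)) (c : PySem.Dict String String),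
      pvTruthy c = true →
      pvFinish (ls.foldl pvStepA (v, c)) = v ++ pvParseCont c ls := by
  induction ls with
  | nil => intro v c hc; simp [pvFinish, pvParseCont, hc]
  | cons l ls ih =>
    intro v c hc
    cases hID : pvHasID l with
    | true =>
      rw [List.foldl_cons, pvStepA_id v c l hID, if_pos hc,
        ih (v ++ [c]) (pvInitD l) (pvTruthy_initD l)]
      simp [pvParseCont, hID]
    | false =>
      rw [List.foldl_cons, pvStepA_field v c l hID hc,
        ih v (pvFieldStep c l) (pvTruthy_fieldStep c l hc)]
      simp [pvParseCont, hID]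

-- A's whole loop
theorem pvFoldA (ls : List String) :
    pvFinish (ls.foldl pvStepA ([], PySem.Dict.empty)) = pvRecords ls := by
  induction ls with
  | nil => simp [pvFinish, pvRecords, pvTruthy_empty]
  | cons l ls ih =>
    cases hID : pvHasID l with
    | true =>
      rw [List.foldl_cons, pvStepA_id [] PySem.Dict.empty l hID, if_neg (by simp [pvTruthy_empty]),
        pvFoldA_cont ls [] (pvInitD l) (pvTruthy_initD l)]
      simp [pvRecords, hID]
    | false =>
      rw [List.foldl_cons, pvStepA_skip [] PySem.Dict.empty l hID pvTruthy_empty, ih]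
      simp [pvRecords, hID]

-- B's grouping loop once a group is open
theorem pvFoldG_cont (ls : List String) :
    ∀ (gs : List (List String)) (cur : List String),
      ls.foldl pvStepG (gs ++ [cur]) = gs ++ pvGRec cur ls := by
  induction ls with
  | nil => intro gs cur; simp [pvGRec]
  | cons l ls ih =>
    intro gs cur
    cases hID : pvHasID l with
    | true =>
      rw [List.foldl_cons]
      have hstep : pvStepG (gs ++ [cur]) l = (gs ++ [cur]) ++ [[l]] := by
        simp [pvStepG, hID]
      rw [hstep, ih (gs ++ [cur]) [l]]
      simp [pvGRec, hID]
    | false =>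
      rw [List.foldl_cons]
      have hstep : pvStepG (gs ++ [cur]) l = gs ++ [cur ++ [l]] := by
        simp [pvStepG, hID, PySem.List.pyGetD_neg_one_append_singleton]
      rw [hstep, ih gs (cur ++ [l])]
      simp [pvGRec, hID]

-- B's whole grouping loop
theorem pvFoldG (ls : List String) :
    ls.foldl pvStepG [] = pvGroups ls := by
  induction ls with
  | nil => simp [pvGroups]
  | cons l ls ih =>
    cases hID : pvHasID l with
    | true =>
      rw [List.foldl_cons]
      have hstep : pvStepG [] l = [] ++ [[l]] := by simp [pvStepG, hID]
      rw [hstep, pvFoldG_cont ls [] [l]]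
      simp [pvGroups, hID]
    | false =>
      rw [List.foldl_cons]
      have hstep : pvStepG [] l = [] := by simp [pvStepG, hID]
      rw [hstep, ih]
      simp [pvGroups, hID]

-- _parse_group on a one-line group / on a group extended by a field line
theorem pvParseGroup_single (l : String) : pvParseGroup [l] = pvInitD l := by
  simp [pvParseGroup, pvInitD, PySem.List.slice_from_one, PySem.List.pyGetD_zero_cons]

theorem pvParseGroup_append (c : String) (cs : List String) (l : String) :
    pvParseGroup ((c :: cs) ++ [l]) = pvFieldStep (pvParseGroup (c :: cs)) l := by
  simp [pvParseGroup, pvFieldStep, PySem.List.slice_from_one, PySem.List.pyGetD_zero_cons]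

-- parsing a recursive group split = the continuation spec
theorem pvMapGRec (ls : List String) :
    ∀ (c : String) (cs : List String),
      (pvGRec (c :: cs) ls).map pvParseGroup = pvParseCont (pvParseGroup (c :: cs)) ls := by
  induction ls with
  | nil => intro c cs; simp [pvGRec, pvParseCont]
  | cons l ls ih =>
    intro c cs
    cases hID : pvHasID l with
    | true =>
      simp only [pvGRec, pvParseCont, hID, if_true, List.map_cons]
      rw [ih l [], pvParseGroup_single]
    | false =>
      simp only [pvGRec, pvParseCont, hID, Bool.false_eq_true, if_false]
      rw [List.cons_append, ih c (cs ++ [l]), ← List.cons_append, pvParseGroup_append]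

theorem pvMapGroups (ls : List String) :
    (pvGroups ls).map pvParseGroup = pvRecords ls := by
  induction ls with
  | nil => simp [pvGroups, pvRecords]
  | cons l ls ih =>
    cases hID : pvHasID l with
    | true =>
      simp only [pvGroups, pvRecords, hID, if_true]
      rw [pvMapGRec ls l [], pvParseGroup_single]
    | false =>
      simpa [pvGroups, pvRecords, hID] using ih

-- ===== VERDICT (by name: the statement is the Claim_ definition above) =====
theorem parse_audit_output_spec : Claim_equal_parse_audit_output := by
  intro out_ _
  unfold Spec_parse_audit_output parse_audit_output parse_audit_output_alt
  rw [pvFoldA (PySem.Str.splitlines out_), pvFoldG (PySem.Str.splitlines out_),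
    PySem.List.slice_to _ (by norm_num), PySem.List.slice_to _ (by norm_num),
    List.map_take]
  conv_rhs => rw [List.map_take, pvMapGroups, List.map_take]
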